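-- pv_equiv track=rewrite | github.com/qiaogeno1/BansrChat | ASR.py | get_final_recognition_result
-- ===== SOURCE A (Python) =====
-- def get_final_recognition_result(results_list): # 文字识别方法
--     """
--     根据所有识别结果，生成最终的纯文本识别结果
--     :param results_list: 识别结果列表
--     :return: 纯文本识别结果
--     """
--     if not results_list:
--         return ""
--
--     # 重新整理结果，分为已完成的句子和当前进行的句子
--     final_sentence_results = []  # 已经结束的句子
--     current_sentence_results = []  # 当前正在处理的句子
--
--     # 将结果分为已结束句子和当前处理句子
--     for result in results_list:
--         if result.get("is_sentence_end", False):
--             if current_sentence_results: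
--                 # 当前句子有内容，合并后添加到已结束句子
--                 current_text = "".join([r["text"] for r in current_sentence_results])
--                 final_sentence_results.append(current_text)
--                 current_sentence_results = []
--
--             # 添加结束句子
--             final_sentence_results.append(result["text"])
--         else:
--             # 添加到当前处理句子
--             current_sentence_results.append(result)
--
--     # 构建最终显示结果
--     final_result = ""
--
--     # 添加已结束的句子
--     if final_sentence_results:
--         final_result += "".join(final_sentence_results)
--
--     # 添加当前处理的句子（如果有）
--     if current_sentence_results:
--         # 非最终结果
--         non_final_results = [r for r in current_sentence_results if not r.get("is_final", True)]
--         if non_final_results: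
--             # 使用最新的非最终结果
--             final_result += non_final_results[-1]["text"]
--
--     return final_result
-- ===== SOURCE B (Python) =====
-- def get_final_recognition_result(results_list):
--     # Index of the last segment whose is_sentence_end is truthy (-1 if none).
--     last = -1
--     for i, r in enumerate(results_list):
--         if r.get("is_sentence_end", False):
--             last = i
--     prefix = results_list[:last + 1]
--     suffix = results_list[last + 1:]
--     out = "".join(r["text"] for r in prefix)
--     non_final = [r for r in suffix if not r.get("is_final", True)]
--     if non_final:
--         out += non_final[-1]["text"]
--     return out
-- ===== Notes on version B (the rewrite author's own statement) =====
-- stated objective: simpler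
-- what changed: Replaces A's stateful split into a finished-sentence accumulator plus a running current-sentence buffer by a single scan for the index of the last sentence-end, a slice into prefix/suffix, one join over the prefix and a filter over the suffix; Pre_ excludes only the inputs where A raises KeyError (a needed 'text' key missing), on which B raises too.
import Mathlib
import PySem

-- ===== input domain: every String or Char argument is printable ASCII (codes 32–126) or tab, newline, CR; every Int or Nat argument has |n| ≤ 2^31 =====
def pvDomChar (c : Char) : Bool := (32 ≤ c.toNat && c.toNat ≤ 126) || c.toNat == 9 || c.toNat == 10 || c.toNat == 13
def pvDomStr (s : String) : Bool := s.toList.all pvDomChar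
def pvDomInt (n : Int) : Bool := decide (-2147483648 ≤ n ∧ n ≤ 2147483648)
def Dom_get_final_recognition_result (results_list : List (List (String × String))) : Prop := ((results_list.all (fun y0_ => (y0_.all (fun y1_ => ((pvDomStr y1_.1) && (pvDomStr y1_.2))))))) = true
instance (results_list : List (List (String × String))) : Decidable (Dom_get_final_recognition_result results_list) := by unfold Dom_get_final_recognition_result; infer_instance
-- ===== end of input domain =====

-- B is a simpler decomposition: find the index of the last sentence-end, then one join over the
-- prefix and one filter over the suffix, instead of A's finished/current two-accumulator loop.

-- shared dict-field helpers (a dict is an assoc list, first match wins)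
-- r["text"], total stand-in: "" where Python raises KeyError (those inputs are outside Pre_)
def pvText (r : List (String × String)) : String := (r.lookup "text").getD ""
-- truthiness of r.get("is_sentence_end", False): key present with a non-empty string value
def pvEnd (r : List (String × String)) : Bool :=
  match r.lookup "is_sentence_end" with
  | none => false
  | some s => s != ""
-- truthiness of (not r.get("is_final", True)): key present with an empty string value
def pvNonFinal (r : List (String × String)) : Bool :=
  match r.lookup "is_final" with
  | none => false
  | some s => s == ""

-- ===== PORT A =====
def get_final_recognition_result (results_list : List (List (String × String))) : String :=
  if results_list = [] then ""
  else
    let st := results_list.foldl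
      (fun (st : List String × List (List (String × String))) result =>
        let finals := st.1
        let current := st.2
        if pvEnd result then
          let finals := if current ≠ [] then finals ++ [PySem.Str.join "" (current.map pvText)] else finals
          (finals ++ [pvText result], [])
        else
          (finals, current ++ [result]))
      ([], [])
    let final_result := ""
    let final_result := if st.1 ≠ [] then final_result ++ PySem.Str.join "" st.1 else final_result
    let final_result :=
      if st.2 ≠ [] then
        let non_final := st.2.filter pvNonFinal
        if non_final ≠ [] then final_result ++ pvText (PySem.List.pyGetD non_final (-1) [])
        else final_result
      else final_result
    final_result

-- ===== PORT B =====
def get_final_recognition_result_alt (results_list : List (List (String × String))) : String :=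
  let last : Int := (PySem.List.enumerate results_list 0).foldl
    (fun acc p => if pvEnd p.2 then p.1 else acc) (-1)
  let pre := PySem.List.slice results_list none (some (last + 1))
  let suffix := PySem.List.slice results_list (some (last + 1)) none
  let out := PySem.Str.join "" (pre.map pvText)
  let non_final := suffix.filter pvNonFinal
  if non_final ≠ [] then out ++ pvText (PySem.List.pyGetD non_final (-1) []) else out

-- ===== PRECONDITION & SPEC =====
-- Pre_ excludes exactly the inputs on which Python A raises KeyError: a segment at or before the
-- last truthy is_sentence_end without a "text" key, or a last non-final trailing segment without it.
-- (Both Lean ports total these accesses with a "" default, so the proved equality happens to hold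
-- even outside Pre_; Pre_ is still needed to state where the ports are faithful to the Pythons.)
def Pre_get_final_recognition_result (results_list : List (List (String × String))) : Prop :=
  (∀ i : Fin results_list.length,
      (∃ j : Fin results_list.length, (i : Nat) ≤ (j : Nat) ∧ pvEnd results_list[j]) →
      (results_list[i].lookup "text").isSome) ∧
  (∀ i : Fin results_list.length,
      (∀ j : Fin results_list.length, (i : Nat) ≤ (j : Nat) → ¬ pvEnd results_list[j]) →
      pvNonFinal results_list[i] →
      (∀ k : Fin results_list.length, (i : Nat) < (k : Nat) → ¬ pvNonFinal results_list[k]) →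
      (results_list[i].lookup "text").isSome)
instance (results_list : List (List (String × String))) : Decidable (Pre_get_final_recognition_result results_list) := by
  unfold Pre_get_final_recognition_result; infer_instance

def pvWitness_get_final_recognition_result : (List (List (String × String))) :=
  [[("text", "hi"), ("is_sentence_end", "1")], [("text", "yo"), ("is_final", "")]]

def Spec_get_final_recognition_result (results_list : List (List (String × String))) (out : String) : Prop := out = get_final_recognition_result_alt results_list
instance (results_list : List (List (String × String))) (out : String) : Decidable (Spec_get_final_recognition_result results_list out) := by unfold Spec_get_final_recognition_result; infer_instance

-- ===== CLAIM (what is proved, stated in full; the proofs are below) =====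
def Claim_equal_get_final_recognition_result : Prop := ∀ (results_list : List (List (String × String))), Dom_get_final_recognition_result results_list → Pre_get_final_recognition_result results_list → Spec_get_final_recognition_result results_list (get_final_recognition_result results_list)

-- ===== LEMMAS AND PROOFS =====

-- proof-side helpers: A's loop step and post-processing, named so the fold can be reasoned about
def pvStepA (st : List String × List (List (String × String))) (result : List (String × String)) :
    List String × List (List (String × String)) :=
  let finals := st.1
  let current := st.2
  if pvEnd result then
    let finals := if current ≠ [] then finals ++ [PySem.Str.join "" (current.map pvText)] else finals
    (finals ++ [pvText result], [])
  else
    (finals, current ++ [result])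

def pvPostA (st : List String × List (List (String × String))) : String :=
  let final_result := ""
  let final_result := if st.1 ≠ [] then final_result ++ PySem.Str.join "" st.1 else final_result
  if st.2 ≠ [] then
    let non_final := st.2.filter pvNonFinal
    if non_final ≠ [] then final_result ++ pvText (PySem.List.pyGetD non_final (-1) [])
    else final_result
  else final_result

-- the trailing-segment contribution: text of the last non-final entry, if any
def pvNF (xs : List (List (String × String))) : String :=
  let non_final := xs.filter pvNonFinal
  if non_final ≠ [] then pvText (PySem.List.pyGetD non_final (-1) []) else ""

-- the value A's loop+post-processing produces from a pending buffer `cur` and remaining input `l`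
def pvS (cur l : List (List (String × String))) : String :=
  match l with
  | [] => pvNF cur
  | x :: xs =>
      if pvEnd x then PySem.Str.join "" ((cur ++ [x]).map pvText) ++ pvS [] xs
      else pvS (cur ++ [x]) xs

-- index just after the last truthy is_sentence_end (0 if none)
def pvK : List (List (String × String)) → Nat
  | [] => 0
  | x :: xs => if pvK xs ≠ 0 then pvK xs + 1 else if pvEnd x then 1 else 0

theorem pv_join_nil : PySem.Str.join "" ([] : List String) = "" := rfl

theorem pv_join_cons (a : String) (l : List String) :
    PySem.Str.join "" (a :: l) = a ++ PySem.Str.join "" l := by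
  cases l with
  | nil => simp [PySem.Str.join, PySem.Chars.join_singleton, PySem.Chars.join_nil]
  | cons b m => simp [PySem.Str.join, PySem.Chars.join_cons_cons]

theorem pv_join_append (a b : List String) :
    PySem.Str.join "" (a ++ b) = PySem.Str.join "" a ++ PySem.Str.join "" b := by
  induction a with
  | nil => simp [pv_join_nil]
  | cons x xs ih => simp [pv_join_cons, ih, String.append_assoc]

theorem pvPostA_eq (fs : List String) (cur : List (List (String × String))) :
    pvPostA (fs, cur) = PySem.Str.join "" fs ++ pvNF cur := by
  simp only [pvPostA, pvNF]
  by_cases hf : fs = []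
  · subst hf
    by_cases hc : cur = [] <;> simp [hc, pv_join_nil]
  · by_cases hc : cur = []
    · simp [hf, hc]
    · simp [hf, hc]
      split <;> simp

theorem pv_foldA (l : List (List (String × String))) :
    ∀ fs cur, pvPostA (l.foldl pvStepA (fs, cur)) = PySem.Str.join "" fs ++ pvS cur l := by
  induction l with
  | nil => intro fs cur; simpa [pvS] using pvPostA_eq fs cur
  | cons x xs ih =>
      intro fs cur
      by_cases he : pvEnd x
      · have h1 : pvStepA (fs, cur) x =
            ((if cur ≠ [] then fs ++ [PySem.Str.join "" (cur.map pvText)] else fs) ++ [pvText x], []) := by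
          simp [pvStepA, he]
        calc pvPostA ((x :: xs).foldl pvStepA (fs, cur))
            = pvPostA (xs.foldl pvStepA (pvStepA (fs, cur) x)) := rfl
          _ = PySem.Str.join ""
                ((if cur ≠ [] then fs ++ [PySem.Str.join "" (cur.map pvText)] else fs) ++ [pvText x])
                ++ pvS [] xs := by rw [h1]; exact ih _ _
          _ = PySem.Str.join "" fs ++ pvS cur (x :: xs) := by
                by_cases hc : cur = [] <;>
                  simp [pvS, he, hc, pv_join_append, pv_join_cons, pv_join_nil, String.append_assoc]
      · have h1 : pvStepA (fs, cur) x = (fs, cur ++ [x]) := by simp [pvStepA, he]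
        calc pvPostA ((x :: xs).foldl pvStepA (fs, cur))
            = pvPostA (xs.foldl pvStepA (pvStepA (fs, cur) x)) := rfl
          _ = PySem.Str.join "" fs ++ pvS (cur ++ [x]) xs := by rw [h1]; exact ih _ _
          _ = PySem.Str.join "" fs ++ pvS cur (x :: xs) := by simp [pvS, he]

theorem pvS_char (l : List (List (String × String))) :
    ∀ cur, pvS cur l =
      if pvK l = 0 then pvNF (cur ++ l)
      else PySem.Str.join "" ((cur ++ l.take (pvK l)).map pvText) ++ pvNF (l.drop (pvK l)) := by
  induction l with
  | nil => intro cur; simp [pvS, pvK]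
  | cons x xs ih =>
      intro cur
      by_cases he : pvEnd x
      · have h1 : pvS cur (x :: xs)
            = PySem.Str.join "" ((cur ++ [x]).map pvText) ++ pvS [] xs := by simp [pvS, he]
        rw [h1, ih]
        by_cases hk : pvK xs = 0
        · have hK : pvK (x :: xs) = 1 := by simp [pvK, hk, he]
          simp [hK, hk, List.take, List.drop]
        · have hK : pvK (x :: xs) = pvK xs + 1 := by simp [pvK, hk]
          simp [hK, hk, List.take_succ_cons, List.drop_succ_cons, pv_join_append, pv_join_cons,
            pv_join_nil, String.append_assoc]
      · have h1 : pvS cur (x :: xs) = pvS (cur ++ [x]) xs := by simp [pvS, he]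
        rw [h1, ih]
        by_cases hk : pvK xs = 0
        · have hK : pvK (x :: xs) = 0 := by simp [pvK, hk, he]
          simp [hK, hk, List.append_assoc]
        · have hK : pvK (x :: xs) = pvK xs + 1 := by simp [pvK, hk]
          simp [hK, hk, List.take_succ_cons, List.drop_succ_cons, List.append_assoc]

theorem pv_fold_last (l : List (List (String × String))) :
    ∀ (s : Int) (acc : Int),
      (PySem.List.enumerate l s).foldl (fun a p => if pvEnd p.2 then p.1 else a) acc
        = if pvK l = 0 then acc else s + pvK l - 1 := by
  induction l with
  | nil => intro s acc; simp [PySem.List.enumerate_nil, pvK]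
  | cons x xs ih =>
      intro s acc
      rw [PySem.List.enumerate_cons]
      simp only [List.foldl_cons]
      rw [ih (s + 1)]
      by_cases hk : pvK xs = 0
      · by_cases he : pvEnd x <;> simp [pvK, hk, he]
      · have hK : pvK (x :: xs) = pvK xs + 1 := by simp [pvK, hk]
        rw [if_neg hk, hK, if_neg (Nat.succ_ne_zero _)]
        push_cast
        ring

theorem pvB_eq (rl : List (List (String × String))) :
    get_final_recognition_result_alt rl
      = PySem.Str.join "" ((rl.take (pvK rl)).map pvText) ++ pvNF (rl.drop (pvK rl)) := by
  have hlast : (if pvK rl = 0 then (-1 : Int) else 0 + pvK rl - 1) + 1 = ((pvK rl : Nat) : Int) := by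
    split
    · simp_all
    · omega
  simp only [get_final_recognition_result_alt]
  rw [pv_fold_last rl 0 (-1), hlast, PySem.List.slice_to_natCast, PySem.List.slice_from_natCast]
  simp only [pvNF]
  split <;> simp

theorem pvA_eq (rl : List (List (String × String))) :
    get_final_recognition_result rl = pvS [] rl := by
  by_cases h : rl = []
  · subst h; rfl
  · have h0 : get_final_recognition_result rl
        = if rl = [] then "" else pvPostA (rl.foldl pvStepA ([], [])) := rfl
    rw [h0, if_neg h, pv_foldA rl [] [], pv_join_nil]
    simp

-- ===== VERDICT (by name: the statement is the Claim_ definition above) =====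
theorem get_final_recognition_result_spec : Claim_equal_get_final_recognition_result := by
  intro rl _ _
  unfold Spec_get_final_recognition_result
  rw [pvA_eq, pvB_eq, pvS_char rl []]
  by_cases hk : pvK rl = 0
  · simp [hk, pv_join_nil]
  · simp [hk]
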